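-- pv_equiv track=rewrite | github.com/ivi982010/SySdL-TPs | Lexer.py | a_OpRel2
-- ===== SOURCE A (Python) =====
-- def a_OpRel2(tokens, acu):
-- 	s=0;
-- 	for c in acu:
-- 		if s==0 and c=='<':
-- 			s=1
-- 		else:
-- 			s=-1
-- 			break
-- 	if s==2:
-- 		tokens.append(("<OpRel>",acu))
-- 	return s==1
-- ===== SOURCE B (Python) =====
-- def a_OpRel2(tokens, acu):
--     # Direct closed-form check: the scan accepts exactly the one-character string "<".
--     # The s==2 append branch in A is dead, so tokens is never modified.
--     return acu == "<"
-- ===== Notes on version B (the rewrite author's own statement) =====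
-- stated objective: simpler
-- what changed: Replaced the character-by-character state-machine scan (state variable, break, dead append branch) with a single closed-form string comparison acu == "<".
import Mathlib
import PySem

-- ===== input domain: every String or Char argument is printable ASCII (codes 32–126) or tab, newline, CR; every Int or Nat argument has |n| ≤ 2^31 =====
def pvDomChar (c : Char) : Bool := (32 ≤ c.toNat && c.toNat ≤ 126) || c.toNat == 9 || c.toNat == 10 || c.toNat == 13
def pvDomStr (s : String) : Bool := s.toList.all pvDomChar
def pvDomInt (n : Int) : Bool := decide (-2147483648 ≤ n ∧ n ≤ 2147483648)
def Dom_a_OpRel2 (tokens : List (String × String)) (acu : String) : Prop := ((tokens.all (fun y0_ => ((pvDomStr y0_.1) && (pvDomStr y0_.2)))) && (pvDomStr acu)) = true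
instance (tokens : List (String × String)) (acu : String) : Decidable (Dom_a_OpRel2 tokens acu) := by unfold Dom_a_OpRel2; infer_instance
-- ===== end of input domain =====

-- B replaces A's state-machine scan with the closed-form comparison acu == "<" (simpler);
-- A's `if s==2: tokens.append(...)` branch is dead (s is never 2), so neither version mutates tokens.

-- ===== PORT A =====
-- the for-loop with break: state s, stops early on the -1 branch
def a_OpRel2_loop : List Char → Int → Int
  | [], s => s
  | c :: rest, s => if s == 0 && c == '<' then a_OpRel2_loop rest 1 else -1

def a_OpRel2 (tokens : List (String × String)) (acu : String) : Bool :=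
  let s := a_OpRel2_loop acu.toList 0
  -- `if s == 2 then tokens.append ...` is dead code and does not affect the return value
  s == 1

-- ===== PORT B =====
def a_OpRel2_alt (tokens : List (String × String)) (acu : String) : Bool :=
  acu == "<"

-- ===== PRECONDITION & SPEC =====
def Spec_a_OpRel2 (tokens : List (String × String)) (acu : String) (out : Bool) : Prop := out = a_OpRel2_alt tokens acu
instance (tokens : List (String × String)) (acu : String) (out : Bool) : Decidable (Spec_a_OpRel2 tokens acu out) := by unfold Spec_a_OpRel2; infer_instance

-- ===== CLAIM (what is proved, stated in full; the proofs are below) =====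
def Claim_equal_a_OpRel2 : Prop := ∀ (tokens : List (String × String)) (acu : String), Dom_a_OpRel2 tokens acu → Spec_a_OpRel2 tokens acu (a_OpRel2 tokens acu)

-- ===== LEMMAS AND PROOFS =====

-- the scan returns 1 exactly on the single-character list ['<']
theorem a_OpRel2_loop_eq_one (cs : List Char) : (a_OpRel2_loop cs 0 == 1) = (cs = ['<'] : Bool) := by
  cases cs with
  | nil => simp [a_OpRel2_loop]
  | cons c rest =>
    by_cases hc : c = '<'
    · subst hc
      cases rest with
      | nil => simp [a_OpRel2_loop]
      | cons d rest' => simp [a_OpRel2_loop]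
    · simp [a_OpRel2_loop, hc]

-- ===== VERDICT (by name: the statement is the Claim_ definition above) =====
theorem a_OpRel2_spec : Claim_equal_a_OpRel2 := by
  intro tokens acu _
  unfold Spec_a_OpRel2 a_OpRel2 a_OpRel2_alt
  rw [a_OpRel2_loop_eq_one]
  by_cases h : acu = "<"
  · subst h; rfl
  · have h' : acu.toList ≠ ['<'] := fun hl =>
      h (String.toList_inj.mp (hl.trans (rfl : ("<" : String).toList = ['<']).symm))
    simp [h, h']
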